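-- pv_equiv track=rewrite | github.com/heojungeun/codingtestPractice | resol/42840.py | solution
-- ===== SOURCE A (Python) =====
-- def solution(answers):
--     each_ans = {1: [1, 2, 3, 4, 5],
--                 2: [2, 1, 2, 3, 2, 4, 2, 5],
--                 3: [3, 3, 1, 1, 2, 2, 4, 4, 5, 5]}
--     order = [5, 8, 10]
--     score = {1: 0, 2: 0, 3: 0}
--     lena = len(answers)
--     for i in range(lena):
--         for j in range(3):
--             if each_ans[j + 1][i % order[j]] == answers[i]:
--                 score[j + 1] += 1
--     sortScore = sorted(score.items(), key=lambda x: (-x[1], x[0]))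
--     if sortScore[0][1] == sortScore[2][1]:
--         return [1, 2, 3]
--     elif sortScore[0][1] == sortScore[1][1]:
--         return [sortScore[0][0], sortScore[1][0]]
--     else:
--         return [sortScore[0][0]]
-- ===== SOURCE B (Python) =====
-- def solution(answers):
--     pats = ([1, 2, 3, 4, 5], [2, 1, 2, 3, 2, 4, 2, 5], [3, 3, 1, 1, 2, 2, 4, 4, 5, 5])
--     # One counting pass that never looks at the patterns: histogram keyed by (i % 40, value).
--     cnt = {}
--     for i, a in enumerate(answers):
--         key = (i % 40, a)
--         cnt[key] = cnt.get(key, 0) + 1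
--     # Every pattern's period divides 40 (= lcm(5,8,10)), so 40 histogram lookups give its score.
--     scores = [sum(cnt.get((r, p[r % len(p)]), 0) for r in range(40)) for p in pats]
--     best = max(scores)
--     return [k for k in (1, 2, 3) if scores[k - 1] == best]
-- ===== Notes on version B (the rewrite author's own statement) =====
-- stated objective: alternative
-- what changed: B replaces A's per-answer comparison against the three cyclic patterns by a single pattern-blind counting pass building a histogram keyed by (index mod 40, answer), then scores each pattern with 40 histogram lookups (the periods 5,8,10 divide 40) and returns the max-scoring pattern numbers by a filter instead of A's sort with staged tie comparisons.
import Mathlib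
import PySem

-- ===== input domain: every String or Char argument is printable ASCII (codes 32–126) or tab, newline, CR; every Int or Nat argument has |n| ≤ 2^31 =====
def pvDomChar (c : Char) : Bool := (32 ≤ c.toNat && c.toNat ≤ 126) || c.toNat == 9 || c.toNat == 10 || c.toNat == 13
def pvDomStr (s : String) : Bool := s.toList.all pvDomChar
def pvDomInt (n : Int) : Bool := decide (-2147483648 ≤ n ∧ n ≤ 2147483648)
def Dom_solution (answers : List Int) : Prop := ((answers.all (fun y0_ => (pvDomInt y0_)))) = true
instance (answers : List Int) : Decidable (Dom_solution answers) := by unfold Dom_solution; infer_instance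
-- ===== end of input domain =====

-- B replaces A's pattern-comparison double loop by a pattern-blind (index mod 40, value)
-- histogram pass plus 40 lookups per pattern, and picks winners by a max-filter instead of
-- A's sort with staged tie comparisons (objective: alternative).


-- ===== PORT A =====
def solution (answers : List Int) : List Int :=
  let eachAns : PySem.Dict Int (List Int) :=
    PySem.Dict.ofList [(1, [1,2,3,4,5]), (2, [2,1,2,3,2,4,2,5]), (3, [3,3,1,1,2,2,4,4,5,5])]
  let order : List Int := [5, 8, 10]
  let score0 : PySem.Dict Int Int := PySem.Dict.ofList [(1,0),(2,0),(3,0)]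
  let lena : Int := answers.length
  let score := (PySem.List.pyRange 0 lena 1).foldl (fun score i =>
    (PySem.List.pyRange 0 3 1).foldl (fun score j =>
      if PySem.List.pyGetD (PySem.Dict.getD eachAns (j+1) []) (PySem.Int.mod i (PySem.List.pyGetD order j 0)) 0
         = PySem.List.pyGetD answers i 0
      then PySem.Dict.modify score (j+1) 0 (· + 1) else score) score) score0
  let sortScore := PySem.List.sorted2 score.items (fun x => -x.2) (fun x => x.1)
  if (PySem.List.pyGetD sortScore 0 (0,0)).2 = (PySem.List.pyGetD sortScore 2 (0,0)).2 then [1,2,3]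
  else if (PySem.List.pyGetD sortScore 0 (0,0)).2 = (PySem.List.pyGetD sortScore 1 (0,0)).2 then
    [(PySem.List.pyGetD sortScore 0 (0,0)).1, (PySem.List.pyGetD sortScore 1 (0,0)).1]
  else [(PySem.List.pyGetD sortScore 0 (0,0)).1]

-- ===== PORT B =====
def solution_alt (answers : List Int) : List Int :=
  let pats : List (List Int) := [[1,2,3,4,5],[2,1,2,3,2,4,2,5],[3,3,1,1,2,2,4,4,5,5]]
  let cnt : PySem.Dict (Int × Int) Int := (PySem.List.enumerate answers 0).foldl
    (fun c ia => c.insert (PySem.Int.mod ia.1 40, ia.2)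
                  (c.getD (PySem.Int.mod ia.1 40, ia.2) 0 + 1)) PySem.Dict.empty
  let scores := pats.map (fun p =>
    ((PySem.List.pyRange 0 40 1).map (fun r =>
      PySem.Dict.getD cnt (r, PySem.List.pyGetD p (PySem.Int.mod r (p.length : Int)) 0) 0)).sum)
  let best := (PySem.List.max? scores (fun x => x)).getD 0
  ([1,2,3] : List Int).filter (fun k => PySem.List.pyGetD scores (k-1) 0 == best)

-- ===== PRECONDITION & SPEC =====
def Spec_solution (answers : List Int) (out : List Int) : Prop := out = solution_alt answers
instance (answers : List Int) (out : List Int) : Decidable (Spec_solution answers out) := by unfold Spec_solution; infer_instance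

-- ===== CLAIM (what is proved, stated in full; the proofs are below) =====
def Claim_equal_solution : Prop := ∀ (answers : List Int), Dom_solution answers → Spec_solution answers (solution answers)

-- ===== LEMMAS AND PROOFS =====

-- per-answer indicator for one pattern
def pvInd (p : List Int) (i a : Int) : Int :=
  if PySem.List.pyGetD p (PySem.Int.mod i (p.length : Int)) 0 = a then 1 else 0

-- partial score sum from start index s
def pvSum (p : List Int) (xs : List Int) (s : Int) : Int :=
  ((PySem.List.enumerate xs s).map (fun ia => pvInd p ia.1 ia.2)).sum

theorem pvSum_cons (p : List Int) (x : Int) (xs : List Int) (s : Int) :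
    pvSum p (x :: xs) s = pvInd p s x + pvSum p xs (s + 1) := by
  simp [pvSum, PySem.List.enumerate_cons]

-- one iteration of A's outer loop (the inner for-j loop) on the score dict
theorem pvStep (i a c1 c2 c3 : Int) :
    (PySem.List.pyRange 0 3 1).foldl (fun sc j =>
      if PySem.List.pyGetD (PySem.Dict.getD (PySem.Dict.ofList
            [(1, [1,2,3,4,5]), (2, [2,1,2,3,2,4,2,5]), (3, [3,3,1,1,2,2,4,4,5,5])]) (j+1) [])
          (PySem.Int.mod i (PySem.List.pyGetD [5,8,10] j 0)) 0 = a
      then PySem.Dict.modify sc (j+1) 0 (· + 1) else sc) (PySem.Dict.mk [(1,c1),(2,c2),(3,c3)])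
    = PySem.Dict.mk [(1, c1 + pvInd [1,2,3,4,5] i a), (2, c2 + pvInd [2,1,2,3,2,4,2,5] i a),
                     (3, c3 + pvInd [3,3,1,1,2,2,4,4,5,5] i a)] := by
  have hr : PySem.List.pyRange 0 3 1 = [0,1,2] := by decide
  rw [hr]
  simp only [List.foldl_cons, List.foldl_nil]
  rw [show ((0:Int)+1)=1 by decide, show ((1:Int)+1)=2 by decide, show ((2:Int)+1)=3 by decide,
    show PySem.Dict.getD ((PySem.Dict.ofList
            [(1, [1,2,3,4,5]), (2, [2,1,2,3,2,4,2,5]), (3, [3,3,1,1,2,2,4,4,5,5])]) : PySem.Dict Int (List Int)) 1 [] = [1,2,3,4,5] by decide,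
    show PySem.Dict.getD ((PySem.Dict.ofList
            [(1, [1,2,3,4,5]), (2, [2,1,2,3,2,4,2,5]), (3, [3,3,1,1,2,2,4,4,5,5])]) : PySem.Dict Int (List Int)) 2 [] = [2,1,2,3,2,4,2,5] by decide,
    show PySem.Dict.getD ((PySem.Dict.ofList
            [(1, [1,2,3,4,5]), (2, [2,1,2,3,2,4,2,5]), (3, [3,3,1,1,2,2,4,4,5,5])]) : PySem.Dict Int (List Int)) 3 [] = [3,3,1,1,2,2,4,4,5,5] by decide,
    show PySem.List.pyGetD ([5,8,10] : List Int) 0 0 = 5 by decide,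
    show PySem.List.pyGetD ([5,8,10] : List Int) 1 0 = 8 by decide,
    show PySem.List.pyGetD ([5,8,10] : List Int) 2 0 = 10 by decide]
  simp only [pvInd,
    show ((([1,2,3,4,5] : List Int).length : Int)) = 5 by decide,
    show ((([2,1,2,3,2,4,2,5] : List Int).length : Int)) = 8 by decide,
    show ((([3,3,1,1,2,2,4,4,5,5] : List Int).length : Int)) = 10 by decide]
  split_ifs <;>
    simp [PySem.Dict.modify, PySem.Dict.getD, PySem.Dict.get?, PySem.Dict.insert,
      PySem.Dict.contains, List.find?]

-- A's whole scoring loop, rephrased over enumerate, computes the three pvSum totals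
theorem pvLoop (xs : List Int) : ∀ (s c1 c2 c3 : Int),
    (PySem.List.enumerate xs s).foldl (fun sc ia =>
      (PySem.List.pyRange 0 3 1).foldl (fun sc j =>
        if PySem.List.pyGetD (PySem.Dict.getD (PySem.Dict.ofList
              [(1, [1,2,3,4,5]), (2, [2,1,2,3,2,4,2,5]), (3, [3,3,1,1,2,2,4,4,5,5])]) (j+1) [])
            (PySem.Int.mod ia.1 (PySem.List.pyGetD [5,8,10] j 0)) 0 = ia.2
        then PySem.Dict.modify sc (j+1) 0 (· + 1) else sc) sc) (PySem.Dict.mk [(1,c1),(2,c2),(3,c3)])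
    = PySem.Dict.mk [(1, c1 + pvSum [1,2,3,4,5] xs s), (2, c2 + pvSum [2,1,2,3,2,4,2,5] xs s),
                     (3, c3 + pvSum [3,3,1,1,2,2,4,4,5,5] xs s)] := by
  induction xs with
  | nil => intro s c1 c2 c3; simp [PySem.List.enumerate_nil, pvSum]
  | cons x xs ih =>
    intro s c1 c2 c3
    rw [PySem.List.enumerate_cons]
    simp only [List.foldl_cons]
    rw [pvStep s x c1 c2 c3, ih]
    simp [pvSum_cons, add_assoc]

-- A's outer for-i loop over range(len) equals the enumerate fold (i ↦ (i, answers[i]))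
theorem pvFold (answers : List Int) (d0 : PySem.Dict Int Int) :
    (PySem.List.pyRange 0 ((answers.length : Int)) 1).foldl (fun sc i =>
      (PySem.List.pyRange 0 3 1).foldl (fun sc j =>
        if PySem.List.pyGetD (PySem.Dict.getD (PySem.Dict.ofList
              [(1, [1,2,3,4,5]), (2, [2,1,2,3,2,4,2,5]), (3, [3,3,1,1,2,2,4,4,5,5])]) (j+1) [])
            (PySem.Int.mod i (PySem.List.pyGetD [5,8,10] j 0)) 0 = PySem.List.pyGetD answers i 0
        then PySem.Dict.modify sc (j+1) 0 (· + 1) else sc) sc) d0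
    = (PySem.List.enumerate answers 0).foldl (fun sc ia =>
      (PySem.List.pyRange 0 3 1).foldl (fun sc j =>
        if PySem.List.pyGetD (PySem.Dict.getD (PySem.Dict.ofList
              [(1, [1,2,3,4,5]), (2, [2,1,2,3,2,4,2,5]), (3, [3,3,1,1,2,2,4,4,5,5])]) (j+1) [])
            (PySem.Int.mod ia.1 (PySem.List.pyGetD [5,8,10] j 0)) 0 = ia.2
        then PySem.Dict.modify sc (j+1) 0 (· + 1) else sc) sc) d0 := by
  rw [show PySem.List.enumerate answers 0 = PySem.List.enumerate answers from rfl,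
    PySem.List.enumerate_eq_map_pyRange answers 0, List.foldl_map, PySem.List.len_eq]

-- B's key list: (i mod 40, answers[i]) for each enumerated answer
def pvKeys (xs : List Int) : List (Int × Int) :=
  (PySem.List.enumerate xs 0).map (fun ia => (PySem.Int.mod ia.1 40, ia.2))

-- the single-element contribution to the 40-residue lookup sum
theorem pvOne (f : Int → Int) (k : Int × Int) (h : k.1 ∈ PySem.List.pyRange 0 40 1) :
    ((PySem.List.pyRange 0 40 1).map (fun r => if (r, f r) = k then (1:Int) else 0)).sum
      = if k.2 = f k.1 then 1 else 0 := by
  obtain ⟨k1, k2⟩ := k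
  rw [show PySem.List.pyRange 0 40 1 =
    [0,1,2,3,4,5,6,7,8,9,10,11,12,13,14,15,16,17,18,19,20,21,22,23,24,25,26,27,28,29,
     30,31,32,33,34,35,36,37,38,39] from by decide] at h ⊢
  fin_cases h <;> simp [Prod.ext_iff, eq_comm]

-- 40 histogram lookups over counts of a key list equal a countP over the key list
theorem pvSwap (f : Int → Int) (ks : List (Int × Int))
    (h : ∀ k ∈ ks, k.1 ∈ PySem.List.pyRange 0 40 1) :
    ((PySem.List.pyRange 0 40 1).map (fun r => ((ks.count (r, f r)) : Int))).sum
      = (ks.countP (fun k => k.2 == f k.1) : Int) := by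
  induction ks with
  | nil => simp
  | cons k ks ih =>
    have hk := h k (by simp)
    have hks : ∀ k' ∈ ks, k'.1 ∈ PySem.List.pyRange 0 40 1 := fun k' hk' => h k' (by simp [hk'])
    have hcnt : ∀ r : Int, (((k :: ks).count (r, f r)) : Int)
        = ((ks.count (r, f r)) : Int) + (if (r, f r) = k then (1:Int) else 0) := by
      intro r; rw [List.count_cons]; push_cast; split_ifs <;> simp_all
    calc ((PySem.List.pyRange 0 40 1).map (fun r => (((k :: ks).count (r, f r)) : Int))).sum
        = ((PySem.List.pyRange 0 40 1).map (fun r =>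
            ((ks.count (r, f r)) : Int) + (if (r, f r) = k then (1:Int) else 0))).sum := by
          simp only [hcnt]
      _ = ((PySem.List.pyRange 0 40 1).map (fun r => ((ks.count (r, f r)) : Int))).sum
          + ((PySem.List.pyRange 0 40 1).map (fun r => if (r, f r) = k then (1:Int) else 0)).sum := by
          rw [← List.sum_map_add]
      _ = (ks.countP (fun k => k.2 == f k.1) : Int) + (if k.2 = f k.1 then 1 else 0) := by
          rw [ih hks, pvOne f k hk]
      _ = ((k :: ks).countP (fun k => k.2 == f k.1) : Int) := by
          rw [List.countP_cons]; push_cast; split_ifs <;> simp_all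
-- Python mod by a divisor of 40 after mod 40 is mod by the divisor
theorem pvModMod (i L : Int) (hL : 0 < L) (hd : L ∣ 40) :
    PySem.Int.mod (PySem.Int.mod i 40) L = PySem.Int.mod i L := by
  rw [PySem.Int.mod_eq_emod_of_pos (by norm_num : (0:Int) < 40),
    PySem.Int.mod_eq_emod_of_pos hL, PySem.Int.mod_eq_emod_of_pos hL]
  exact Int.emod_emod_of_dvd i hd

-- B's 40-lookup score for one pattern equals the direct match sum
theorem pvScoreEq (p : List Int) (xs : List Int) (hL : 0 < (p.length : Int))
    (hd : (p.length : Int) ∣ 40) :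
    ((PySem.List.pyRange 0 40 1).map (fun r =>
      (((pvKeys xs).count (r, PySem.List.pyGetD p (PySem.Int.mod r (p.length : Int)) 0)) : Int))).sum
    = pvSum p xs 0 := by
  rw [pvSwap (fun r => PySem.List.pyGetD p (PySem.Int.mod r (p.length : Int)) 0) (pvKeys xs) ?hmem]
  case hmem =>
    intro k hk
    simp only [pvKeys, List.mem_map] at hk
    obtain ⟨ia, _, rfl⟩ := hk
    rw [PySem.List.mem_pyRange_one]
    exact ⟨PySem.Int.mod_nonneg _ (by norm_num), PySem.Int.mod_lt _ (by norm_num)⟩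
  · unfold pvKeys pvSum
    rw [List.countP_map]
    induction PySem.List.enumerate xs 0 with
    | nil => simp
    | cons ia t ih =>
      rw [List.countP_cons, List.map_cons, List.sum_cons]
      push_cast
      rw [← ih]
      simp only [Function.comp_apply, pvInd, pvModMod ia.1 (p.length : Int) hL hd]
      rw [add_comm]
      congr 1
      by_cases hx : PySem.List.pyGetD p (PySem.Int.mod ia.1 (p.length : Int)) 0 = ia.2
      · simp [hx]
      · rw [if_neg hx, if_neg (fun h => hx (eq_of_beq h).symm)]

-- the winner selection: A's sorted+staged ties equal B's max-filter, for any three scores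
set_option maxHeartbeats 2000000 in
set_option maxRecDepth 4000 in
theorem pvSel (s1 s2 s3 : Int) :
    (if (PySem.List.pyGetD (PySem.List.sorted2 [((1:Int),s1),(2,s2),(3,s3)] (fun x => -x.2) (fun x => x.1)) 0 ((0:Int),(0:Int))).2
        = (PySem.List.pyGetD (PySem.List.sorted2 [((1:Int),s1),(2,s2),(3,s3)] (fun x => -x.2) (fun x => x.1)) 2 (0,0)).2 then [1,2,3]
     else if (PySem.List.pyGetD (PySem.List.sorted2 [((1:Int),s1),(2,s2),(3,s3)] (fun x => -x.2) (fun x => x.1)) 0 (0,0)).2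
        = (PySem.List.pyGetD (PySem.List.sorted2 [((1:Int),s1),(2,s2),(3,s3)] (fun x => -x.2) (fun x => x.1)) 1 (0,0)).2 then
       [(PySem.List.pyGetD (PySem.List.sorted2 [((1:Int),s1),(2,s2),(3,s3)] (fun x => -x.2) (fun x => x.1)) 0 (0,0)).1,
        (PySem.List.pyGetD (PySem.List.sorted2 [((1:Int),s1),(2,s2),(3,s3)] (fun x => -x.2) (fun x => x.1)) 1 (0,0)).1]
     else [(PySem.List.pyGetD (PySem.List.sorted2 [((1:Int),s1),(2,s2),(3,s3)] (fun x => -x.2) (fun x => x.1)) 0 (0,0)).1])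
    = ([1,2,3] : List Int).filter
        (fun k => PySem.List.pyGetD ([s1,s2,s3] : List Int) (k-1) 0
          == (PySem.List.max? ([s1,s2,s3] : List Int) (fun x => x)).getD 0) := by
  simp only [PySem.List.sorted2, PySem.List.max?, List.foldl_cons, List.foldl_nil,
    List.filter,
    show ((1:Int)-1) = 0 from rfl, show ((2:Int)-1) = 1 from rfl, show ((3:Int)-1) = 2 from rfl,
    show PySem.List.pyGetD ([s1,s2,s3] : List Int) 0 0 = s1 from rfl,
    show PySem.List.pyGetD ([s1,s2,s3] : List Int) 1 0 = s2 from rfl,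
    show PySem.List.pyGetD ([s1,s2,s3] : List Int) 2 0 = s3 from rfl]
  rcases lt_trichotomy s1 s2 with h12|h12|h12 <;>
  rcases lt_trichotomy s1 s3 with h13|h13|h13 <;>
  rcases lt_trichotomy s2 s3 with h23|h23|h23 <;>
    simp_all [PySem.List.insertBy, PySem.List.pyGetD, PySem.List.pyGet?, PySem.List.pyIdx?,
      Int.not_lt.mpr, le_of_lt] <;> (repeat' split) <;> simp_all

-- B's histogram lookup is a count over the key list
theorem pvCntEq (xs : List Int) (key : Int × Int) :
    PySem.Dict.getD ((PySem.List.enumerate xs 0).foldl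
      (fun c ia => c.insert (PySem.Int.mod ia.1 40, ia.2)
        (c.getD (PySem.Int.mod ia.1 40, ia.2) 0 + 1)) PySem.Dict.empty) key 0
    = ((pvKeys xs).count key : Int) := by
  have h : ((PySem.List.enumerate xs 0).foldl
      (fun c ia => c.insert (PySem.Int.mod ia.1 40, ia.2)
        (c.getD (PySem.Int.mod ia.1 40, ia.2) 0 + 1)) PySem.Dict.empty : PySem.Dict (Int × Int) Int)
      = (pvKeys xs).foldl (fun d x => d.insert x (d.getD x 0 + 1)) PySem.Dict.empty := by
    rw [pvKeys, List.foldl_map]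
  rw [h, PySem.Dict.foldl_insert_getD_add_one_eq_counter, PySem.Dict.getD_counter]

-- ===== VERDICT (by name: the statement is the Claim_ definition above) =====
theorem solution_spec : Claim_equal_solution := by
  intro answers _
  unfold Spec_solution
  show solution answers = solution_alt answers
  simp only [solution, solution_alt]
  rw [pvFold,
    show (PySem.Dict.ofList [(1,0),(2,0),(3,0)] : PySem.Dict Int Int) = PySem.Dict.mk [(1,0),(2,0),(3,0)] from by decide,
    pvLoop answers 0 0 0 0]
  simp only [zero_add, List.map_cons, List.map_nil]
  simp only [pvCntEq]
  rw [pvScoreEq [1,2,3,4,5] answers (by decide) (by decide),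
    pvScoreEq [2,1,2,3,2,4,2,5] answers (by decide) (by decide),
    pvScoreEq [3,3,1,1,2,2,4,4,5,5] answers (by decide) (by decide)]
  exact pvSel (pvSum [1,2,3,4,5] answers 0) (pvSum [2,1,2,3,2,4,2,5] answers 0)
    (pvSum [3,3,1,1,2,2,4,4,5,5] answers 0)
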